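-- pv_equiv track=rewrite | github.com/pabloschwarzenberg/grader | tema11_ej1/tema11_ej1_d28ef06740ae520b99800f09eacaf63c.py | palindromo2
-- ===== SOURCE A (Python) =====
-- def palindromo2(palabra):
--     n = 0
--     k = len(palabra)-1
--     while n<len(palabra):
--       if palabra[n] == palabra[k-n]:
--         n = n + 1
--       else:
--         return False
--     return True
-- ===== SOURCE B (Python) =====
-- def palindromo2(palabra):
--     return palabra == palabra[::-1]
-- ===== Notes on version B (the rewrite author's own statement) =====
-- stated objective: idiomatic
-- what changed: Replaced the indexed early-exit while loop with building the reversed string once and a single equality comparison (palabra == palabra[::-1]).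
import Mathlib
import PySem

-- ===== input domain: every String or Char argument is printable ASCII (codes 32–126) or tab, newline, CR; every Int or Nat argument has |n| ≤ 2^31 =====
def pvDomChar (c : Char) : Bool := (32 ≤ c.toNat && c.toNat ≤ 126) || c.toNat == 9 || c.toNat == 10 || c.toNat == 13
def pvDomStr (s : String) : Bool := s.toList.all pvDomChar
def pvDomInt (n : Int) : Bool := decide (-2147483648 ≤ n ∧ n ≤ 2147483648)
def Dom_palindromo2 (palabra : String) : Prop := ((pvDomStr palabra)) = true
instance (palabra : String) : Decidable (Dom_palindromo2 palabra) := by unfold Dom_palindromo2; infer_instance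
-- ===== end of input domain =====

-- B replaces A's indexed early-exit while loop by reversing the string once and one equality test (idiomatic; return value only).

-- ===== PORT A =====
-- the while loop: n counts up; compare palabra[n] with palabra[k-n] (both always in range when n < len)
def pvLoopA (cs : List Char) (k : Int) (n : Nat) : Bool :=
  if n < cs.length then
    if PySem.List.pyGet? cs (n : Int) == PySem.List.pyGet? cs (k - (n : Int)) then
      pvLoopA cs k (n + 1)
    else false
  else true
termination_by cs.length - n

def palindromo2 (palabra : String) : Bool :=
  pvLoopA palabra.toList ((palabra.toList.length : Int) - 1) 0

-- ===== PORT B =====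
-- Source B: return palabra == palabra[::-1]; the slice [::-1] is Str.slice? with step -1
def palindromo2_alt (palabra : String) : Bool :=
  match PySem.Str.slice? palabra none none (-1) with
  | some r => palabra == r
  | none => false

-- ===== PRECONDITION & SPEC =====
def Spec_palindromo2 (palabra : String) (out : Bool) : Prop := out = palindromo2_alt palabra
instance (palabra : String) (out : Bool) : Decidable (Spec_palindromo2 palabra out) := by unfold Spec_palindromo2; infer_instance

-- ===== CLAIM (what is proved, stated in full; the proofs are below) =====
def Claim_equal_palindromo2 : Prop := ∀ (palabra : String), Dom_palindromo2 palabra → Spec_palindromo2 palabra (palindromo2 palabra)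

-- ===== LEMMAS AND PROOFS =====

theorem pvLoopA_iff (cs : List Char) (n : Nat) :
    pvLoopA cs ((cs.length : Int) - 1) n = true ↔
      ∀ i, n ≤ i → ∀ (h : i < cs.length), cs[i] = cs[cs.length - 1 - i]'(by omega) := by
  by_cases hn : n < cs.length
  · rw [pvLoopA]
    have hrange : ((cs.length : Int) - 1 - (n : Int)) = ((cs.length - 1 - n : Nat) : Int) := by
      omega
    rw [if_pos hn, hrange, PySem.List.pyGet?_natCast, PySem.List.pyGet?_natCast]
    have h1 : cs[n]? = some (cs[n]'hn) := List.getElem?_eq_getElem hn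
    have h2 : cs[cs.length - 1 - n]? = some (cs[cs.length - 1 - n]'(by omega)) :=
      List.getElem?_eq_getElem (by omega)
    rw [h1, h2]
    by_cases heq : cs[n]'hn = cs[cs.length - 1 - n]'(by omega)
    · rw [if_pos (by simp [heq])]
      rw [pvLoopA_iff cs (n + 1)]
      constructor
      · intro ih i hi h
        rcases Nat.eq_or_lt_of_le hi with rfl | hlt
        · exact heq
        · exact ih i hlt h
      · intro hall i hi h
        exact hall i (by omega) h
    · rw [if_neg (by simp [heq])]
      simp only [Bool.false_eq_true, false_iff, not_forall]
      exact ⟨n, le_refl n, hn, heq⟩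
  · rw [pvLoopA, if_neg hn]
    constructor
    · intro _ i hi h; omega
    · intro _; rfl
termination_by cs.length - n

theorem palindrome_chars (cs : List Char) :
    (∀ i, 0 ≤ i → ∀ (h : i < cs.length), cs[i] = cs[cs.length - 1 - i]'(by omega)) ↔
      cs = cs.reverse := by
  constructor
  · intro hall
    apply List.ext_getElem (by simp)
    intro i h1 h2
    rw [List.getElem_reverse]
    exact hall i (Nat.zero_le i) h1
  · intro hrev i _ h
    exact (List.getElem_of_eq hrev h).trans (List.getElem_reverse _)

theorem palindromo2_spec : Claim_equal_palindromo2 := by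
  intro palabra _
  unfold Spec_palindromo2 palindromo2 palindromo2_alt
  rw [PySem.Str.slice?_none_none_neg_one]
  rw [Bool.eq_iff_iff, pvLoopA_iff, palindrome_chars]
  exact Iff.trans (by rw [← String.toList_inj, String.toList_ofList]) (beq_iff_eq (a := palabra)).symm
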